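-- pv_equiv track=rewrite | github.com/eyyeung/sorting | insertion_sort.py | gapInsertionSort
-- ===== SOURCE A (Python) =====
-- def gapInsertionSort(nums_list,start_i,gap):
--     sub_array=[]
--     for num in range(start_i,len(nums_list),gap):
--         sub_array.append(nums_list[num])
--     for sub_end_i in range(1,len(sub_array)):
--         number = sub_array[sub_end_i]
--         position = sub_end_i
--         # instead of a for loop, use a while so it would stop when nums_list[position-1] is no longer greater than the number
--         while position > 0 and sub_array[position-1]>number:
--             # if the value at position-1 is greater than number, shift that value right one position
--             sub_array[position] = sub_array[position-1]
--             # decrease the index by 1 for the next round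
--             position -=1
--         sub_array[position] = number
--
--     return sub_array
-- ===== SOURCE B (Python) =====
-- # B: same strided extraction, but sorts the sub-array with a recursive merge sort
-- # (divide in half, sort recursively, merge) instead of A's in-place insertion sort.
-- def _merge(xs, ys):
--     out = []
--     i = j = 0
--     while i < len(xs) and j < len(ys):
--         if xs[i] <= ys[j]:
--             out.append(xs[i]); i += 1
--         else:
--             out.append(ys[j]); j += 1
--     out.extend(xs[i:])
--     out.extend(ys[j:])
--     return out
--
-- def _msort(a):
--     if len(a) <= 1:
--         return a
--     mid = len(a) // 2
--     return _merge(_msort(a[:mid]), _msort(a[mid:]))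
--
-- def gapInsertionSort(nums_list, start_i, gap):
--     sub_array = []
--     for num in range(start_i, len(nums_list), gap):
--         sub_array.append(nums_list[num])
--     return _msort(sub_array)
-- ===== Notes on version B (the rewrite author's own statement) =====
-- stated objective: alternative
-- what changed: Replaced the in-place shifting insertion sort of the strided sub-array by a recursive top-down merge sort (split in half, sort halves, merge).
import Mathlib
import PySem

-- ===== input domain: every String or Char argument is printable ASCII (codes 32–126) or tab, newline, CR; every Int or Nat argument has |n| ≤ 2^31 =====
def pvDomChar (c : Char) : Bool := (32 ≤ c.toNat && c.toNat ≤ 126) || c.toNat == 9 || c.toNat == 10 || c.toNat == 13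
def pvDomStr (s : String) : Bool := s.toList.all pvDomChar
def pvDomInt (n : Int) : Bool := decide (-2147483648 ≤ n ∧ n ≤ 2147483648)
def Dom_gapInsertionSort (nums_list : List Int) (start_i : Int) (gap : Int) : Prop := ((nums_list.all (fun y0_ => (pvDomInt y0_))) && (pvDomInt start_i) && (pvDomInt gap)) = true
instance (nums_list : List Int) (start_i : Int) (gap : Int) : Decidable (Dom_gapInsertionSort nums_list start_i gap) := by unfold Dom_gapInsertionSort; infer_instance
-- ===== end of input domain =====

-- B replaces A's in-place insertion sort of the strided sub-array by a recursive merge sort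
-- (a genuinely different sorting algorithm). Neither version mutates nums_list.

-- ===== PORT A =====
-- the inner `while position > 0 and sub_array[position-1] > number: shift; position -= 1` loop,
-- ending with `sub_array[position] = number`; recursion on `position`
def pvShift (number : Int) (pos : Nat) (arr : List Int) : List Int :=
  match pos with
  | 0 => arr.set 0 number
  | p + 1 =>
      if arr.getD p 0 > number then
        pvShift number p (arr.set (p + 1) (arr.getD p 0))
      else
        arr.set (p + 1) number

def gapInsertionSort (nums_list : List Int) (start_i : Int) (gap : Int) : List Int :=
  -- first loop: sub_array built from nums_list[num] for num in range(start_i, len(nums_list), gap)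
  -- (pyGet?).getD 0 : IndexError inputs are excluded by Pre_
  let sub := (PySem.List.pyRange start_i (nums_list.length : Int) gap).map
      (fun num => ((PySem.List.pyGet? nums_list num).getD 0))
  -- outer loop: for sub_end_i in range(1, len(sub_array))
  (List.range' 1 (sub.length - 1)).foldl
    (fun arr sub_end_i => pvShift (arr.getD sub_end_i 0) sub_end_i arr) sub

-- ===== PORT B =====
-- _merge(xs, ys): two-pointer merge of two lists (structural recursion = the two index pointers)
def pvMerge : List Int → List Int → List Int
  | [], ys => ys
  | x :: xs, [] => x :: xs
  | x :: xs, y :: ys =>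
      if x ≤ y then x :: pvMerge xs (y :: ys) else y :: pvMerge (x :: xs) ys

-- _msort(a): if len(a) <= 1 return a else merge the sorted halves a[:mid], a[mid:]
def pvMsort (l : List Int) : List Int :=
  if l.length ≤ 1 then l
  else pvMerge (pvMsort (l.take (l.length / 2))) (pvMsort (l.drop (l.length / 2)))
termination_by l.length
decreasing_by
  · simp only [List.length_take]; omega
  · simp only [List.length_drop]; omega

def gapInsertionSort_alt (nums_list : List Int) (start_i : Int) (gap : Int) : List Int :=
  pvMsort ((PySem.List.pyRange start_i (nums_list.length : Int) gap).map
      (fun num => ((PySem.List.pyGet? nums_list num).getD 0)))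

-- ===== PRECONDITION & SPEC =====
-- Pre_ excludes exactly the inputs where the Python raises: gap = 0 (ValueError from range),
-- and a visited index out of range (IndexError: gap > 0 with start_i < -len, or gap < 0 with start_i > len).
def Pre_gapInsertionSort (nums_list : List Int) (start_i : Int) (gap : Int) : Prop :=
  gap ≠ 0 ∧ (0 < gap → -(nums_list.length : Int) ≤ start_i) ∧ (gap < 0 → start_i ≤ (nums_list.length : Int))
instance (nums_list : List Int) (start_i : Int) (gap : Int) : Decidable (Pre_gapInsertionSort nums_list start_i gap) := by unfold Pre_gapInsertionSort; infer_instance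

def pvWitness_gapInsertionSort : List Int × Int × Int := ([3, 1, 2, 1], 0, 1)

def Spec_gapInsertionSort (nums_list : List Int) (start_i : Int) (gap : Int) (out : List Int) : Prop := out = gapInsertionSort_alt nums_list start_i gap
instance (nums_list : List Int) (start_i : Int) (gap : Int) (out : List Int) : Decidable (Spec_gapInsertionSort nums_list start_i gap out) := by unfold Spec_gapInsertionSort; infer_instance

-- ===== CLAIM (what is proved, stated in full; the proofs are below) =====
def Claim_equal_gapInsertionSort : Prop := ∀ (nums_list : List Int) (start_i : Int) (gap : Int), Dom_gapInsertionSort nums_list start_i gap → Pre_gapInsertionSort nums_list start_i gap → Spec_gapInsertionSort nums_list start_i gap (gapInsertionSort nums_list start_i gap)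

-- ===== LEMMAS AND PROOFS =====

-- functional form of one insertion step: insert x into l before the first element > x
def insL (x : Int) : List Int → List Int
  | [] => [x]
  | y :: ys => if x < y then x :: y :: ys else y :: insL x ys

theorem length_insL (x : Int) (l : List Int) : (insL x l).length = l.length + 1 := by
  induction l with
  | nil => simp [insL]
  | cons y ys ih => simp only [insL]; split <;> simp [ih]

theorem perm_insL (x : Int) (l : List Int) : (insL x l).Perm (x :: l) := by
  induction l with
  | nil => simp [insL]
  | cons y ys ih =>
    simp only [insL]; split
    · exact List.Perm.refl _
    · exact (ih.cons y).trans (List.Perm.swap x y ys)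

theorem sorted_insL (x : Int) (l : List Int) (h : List.Pairwise (· ≤ ·) l) :
    List.Pairwise (· ≤ ·) (insL x l) := by
  induction l with
  | nil => simp [insL]
  | cons y ys ih =>
    rw [List.pairwise_cons] at h
    obtain ⟨hy, hys⟩ := h
    simp only [insL]
    split
    · rename_i hxy
      rw [List.pairwise_cons]
      refine ⟨?_, List.pairwise_cons.mpr ⟨hy, hys⟩⟩
      intro b hb
      rcases List.mem_cons.mp hb with rfl | hb
      · omega
      · exact le_trans (le_of_lt hxy) (hy b hb)
    · rename_i hxy
      rw [List.pairwise_cons]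
      refine ⟨?_, ih hys⟩
      intro b hb
      rcases List.mem_cons.mp ((perm_insL x ys).mem_iff.mp hb) with rfl | hb
      · omega
      · exact hy b hb

theorem insL_append_of_lt (x y : Int) (h : x < y) (a : List Int) :
    insL x (a ++ [y]) = insL x a ++ [y] := by
  induction a with
  | nil => simp [insL, h]
  | cons z a ih => simp only [List.cons_append, insL]; split <;> simp [ih]

theorem insL_of_all_le (x : Int) (l : List Int) (h : ∀ e ∈ l, e ≤ x) :
    insL x l = l ++ [x] := by
  induction l with
  | nil => simp [insL]
  | cons y ys ih =>
    have hy : y ≤ x := h y (by simp)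
    simp only [insL, if_neg (by omega : ¬ x < y)]
    rw [ih (fun e he => h e (by simp [he]))]
    simp

theorem getD_mid (a : List Int) (y : Int) (t : List Int) :
    (a ++ y :: t).getD a.length 0 = y := by
  simp [List.getD_eq_getElem?_getD]

theorem set_mid (a : List Int) (d : Int) (c : List Int) (v : Int) :
    (a ++ d :: c).set a.length v = a ++ v :: c := by
  induction a with
  | nil => rfl
  | cons z a ih => simp [ih]

-- the while loop inserts `x` into the sorted prefix `a`, overwriting the slot `d`
theorem shift_spec : ∀ (a : List Int), List.Pairwise (· ≤ ·) a →
    ∀ (d : Int) (c : List Int) (x : Int),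
      pvShift x a.length (a ++ d :: c) = insL x a ++ c := by
  intro a
  induction a using List.reverseRecOn with
  | nil => intro _ d c x; simp [pvShift, insL]
  | append_singleton a y ih =>
    intro hs d c x
    rw [List.pairwise_append] at hs
    have hlen : (a ++ [y]).length = a.length + 1 := by simp
    rw [hlen]
    have harr : (a ++ [y]) ++ d :: c = a ++ y :: d :: c := by simp
    simp only [pvShift, harr, getD_mid]
    by_cases hxy : x < y
    · rw [if_pos (by omega)]
      have hset : (a ++ y :: d :: c).set (a.length + 1) y
          = (a ++ [y]) ++ y :: c := by
        have := set_mid (a ++ [y]) d c y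
        simpa using this
      rw [hset]
      have harr2 : (a ++ [y]) ++ y :: c = a ++ y :: y :: c := by simp
      rw [harr2, ih hs.1, insL_append_of_lt x y hxy]
      simp
    · rw [if_neg (by omega)]
      have hset : (a ++ y :: d :: c).set (a.length + 1) x
          = (a ++ [y]) ++ x :: c := by
        have := set_mid (a ++ [y]) d c x
        simpa using this
      rw [hset, insL_of_all_le]
      · simp
      · intro e he
        rcases List.mem_append.mp he with he | he
        · exact le_trans (hs.2.2 e he y (by simp)) (by omega)
        · simp at he; omega

-- the outer for loop, processing indices |l1| … |l1|+|l2|-1, folds insL over l2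
theorem loop_eq (l2 : List Int) : ∀ (l1 : List Int), List.Pairwise (· ≤ ·) l1 → l1 ≠ [] →
    (List.range' l1.length l2.length).foldl
      (fun arr j => pvShift (arr.getD j 0) j arr) (l1 ++ l2)
    = l2.foldl (fun acc y => insL y acc) l1 := by
  induction l2 with
  | nil => intro l1 _ _; simp
  | cons y l2 ih =>
    intro l1 hs hne
    rw [List.length_cons, List.range'_succ, List.foldl_cons]
    have h1 : (l1 ++ y :: l2).getD l1.length 0 = y := getD_mid l1 y l2
    rw [h1, shift_spec l1 hs y l2 y]
    have h2 : l1.length + 1 = (insL y l1).length := (length_insL y l1).symm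
    rw [h2, ih (insL y l1) (sorted_insL y l1 hs)
          (by have := length_insL y l1; intro h; simp [h] at this)]
    simp

theorem foldl_insL_perm (l2 : List Int) : ∀ (l1 : List Int),
    (l2.foldl (fun acc y => insL y acc) l1).Perm (l1 ++ l2) := by
  induction l2 with
  | nil => intro l1; simp
  | cons y l2 ih =>
    intro l1
    rw [List.foldl_cons]
    refine (ih (insL y l1)).trans ?_
    have h1 : (insL y l1 ++ l2).Perm ((y :: l1) ++ l2) :=
      (perm_insL y l1).append_right l2
    exact h1.trans List.perm_middle.symm

theorem foldl_insL_sorted (l2 : List Int) : ∀ (l1 : List Int), List.Pairwise (· ≤ ·) l1 →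
    List.Pairwise (· ≤ ·) (l2.foldl (fun acc y => insL y acc) l1) := by
  induction l2 with
  | nil => intro l1 h; simpa
  | cons y l2 ih => intro l1 h; exact ih _ (sorted_insL y l1 h)

theorem merge_perm (xs ys : List Int) : (pvMerge xs ys).Perm (xs ++ ys) := by
  fun_induction pvMerge with
  | case1 ys => simp
  | case2 x xs => simp
  | case3 x xs y ys h ih => simpa using ih.cons x
  | case4 x xs y ys h ih => exact (ih.cons y).trans List.perm_middle.symm

theorem merge_sorted (xs ys : List Int) (hx : List.Pairwise (· ≤ ·) xs)
    (hy : List.Pairwise (· ≤ ·) ys) : List.Pairwise (· ≤ ·) (pvMerge xs ys) := by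
  fun_induction pvMerge with
  | case1 ys => exact hy
  | case2 x xs => exact hx
  | case3 x xs y ys h ih =>
    rw [List.pairwise_cons] at hx
    rw [List.pairwise_cons]
    refine ⟨?_, ih hx.2 hy⟩
    intro b hb
    rcases List.mem_append.mp ((merge_perm xs (y :: ys)).mem_iff.mp hb) with hb | hb
    · exact hx.1 b hb
    · rcases List.mem_cons.mp hb with rfl | hb
      · exact h
      · exact le_trans h ((List.pairwise_cons.mp hy).1 b hb)
  | case4 x xs y ys h ih =>
    rw [List.pairwise_cons] at hy
    rw [List.pairwise_cons]
    refine ⟨?_, ih hx hy.2⟩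
    intro b hb
    rcases List.mem_append.mp ((merge_perm (x :: xs) ys).mem_iff.mp hb) with hb | hb
    · rcases List.mem_cons.mp hb with rfl | hb
      · omega
      · exact le_trans (by omega) ((List.pairwise_cons.mp hx).1 b hb)
    · exact hy.1 b hb

theorem msort_perm (l : List Int) : (pvMsort l).Perm l := by
  fun_induction pvMsort with
  | case1 l h => exact List.Perm.refl l
  | case2 l h ih1 ih2 =>
    refine (merge_perm _ _).trans ?_
    refine (ih1.append ih2).trans ?_
    rw [List.take_append_drop]

theorem msort_sorted (l : List Int) : List.Pairwise (· ≤ ·) (pvMsort l) := by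
  fun_induction pvMsort with
  | case1 l h =>
    rcases l with _ | ⟨x, _ | ⟨z, t⟩⟩
    · exact List.Pairwise.nil
    · simp
    · simp at h
  | case2 l h ih1 ih2 => exact merge_sorted _ _ ih1 ih2

theorem ins_eq_msort (sub : List Int) :
    (List.range' 1 (sub.length - 1)).foldl
      (fun arr j => pvShift (arr.getD j 0) j arr) sub = pvMsort sub := by
  rcases sub with _ | ⟨x, rest⟩
  · simp [pvMsort]
  · have hl := loop_eq rest [x] (by simp) (by simp)
    simp only [List.length_cons, List.length_nil, List.singleton_append,
      Nat.zero_add] at hl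
    rw [(by simp : (x :: rest).length - 1 = rest.length), hl]
    exact List.Perm.eq_of_pairwise (fun a b _ _ h1 h2 => le_antisymm h1 h2)
      (foldl_insL_sorted rest [x] (by simp))
      (msort_sorted (x :: rest))
      (((foldl_insL_perm rest [x]).trans (by simp)).trans (msort_perm (x :: rest)).symm)

-- ===== VERDICT (by name: the statement is the Claim_ definition above) =====
theorem gapInsertionSort_spec : Claim_equal_gapInsertionSort := by
  intro nums_list start_i gap _ _
  unfold Spec_gapInsertionSort gapInsertionSort gapInsertionSort_alt
  exact ins_eq_msort _
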